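-- pv_equiv track=rewrite | github.com/Robotsnipp/practice-2025-1 | docs/blockchain.py | is_valid_transaction
-- ===== SOURCE A (Python) =====
-- def is_valid_transaction(txn, state):
--     """Проверяет, корректна ли транзакция"""
--     if sum(txn.values()) != 0:
--         return False  # Транзакция должна быть сбалансированной
--
--     for key in txn:
--         balance = state.get(key, 0)
--         if balance + txn[key] < 0:
--             return False  # Недостаточно средств
--     return True
-- ===== SOURCE B (Python) =====
-- def is_valid_transaction(txn, state):
--     """Applies the transaction to a copy of the state, then checks that the
--     total amount of money is conserved and no touched account went negative."""
--     new_state = dict(state)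
--     for key, value in txn.items():
--         new_state[key] = new_state.get(key, 0) + value
--     if sum(new_state.values()) != sum(state.values()):
--         return False
--     return all(new_state[key] >= 0 for key in txn)
-- ===== Notes on version B (the rewrite author's own statement) =====
-- stated objective: alternative
-- what changed: Instead of A's sum-of-deltas test plus per-key recomputation of balances from the old state, B actually applies the transaction to a copy of the state and then validates the result: it checks that the total amount of money is conserved (sum of new balances equals sum of old balances) and that no touched balance in the new state is negative.
import Mathlib
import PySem

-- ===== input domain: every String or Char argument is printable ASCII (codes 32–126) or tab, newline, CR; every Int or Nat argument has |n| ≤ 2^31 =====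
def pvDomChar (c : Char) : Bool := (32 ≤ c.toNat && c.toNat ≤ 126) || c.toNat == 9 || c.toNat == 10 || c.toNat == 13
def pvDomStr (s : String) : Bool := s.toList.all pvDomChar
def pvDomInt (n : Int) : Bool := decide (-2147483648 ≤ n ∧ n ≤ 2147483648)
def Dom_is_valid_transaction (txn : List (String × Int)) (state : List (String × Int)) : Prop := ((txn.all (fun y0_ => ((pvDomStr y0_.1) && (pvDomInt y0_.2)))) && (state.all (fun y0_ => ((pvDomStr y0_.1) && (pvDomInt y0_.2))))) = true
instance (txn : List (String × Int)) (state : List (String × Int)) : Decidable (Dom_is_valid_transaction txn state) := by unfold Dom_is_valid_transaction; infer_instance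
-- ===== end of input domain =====

-- B applies the transaction to a copy of the state and then checks conservation of the
-- total (sum of new balances = sum of old balances) and non-negativity of the touched
-- balances, instead of A's direct sum-of-deltas test and per-key balance recomputation;
-- alternative decomposition, same cost. No argument is mutated.

-- ===== PORT A =====
-- 'for key in txn' with the balance test; txn[key] is exact as getD since key ∈ txn.
def pvALoop (txn state : List (String × Int)) : List String → Bool
  | [] => true
  | k :: rest =>
    let balance := (PySem.Dict.mk state).getD k 0
    if balance + (PySem.Dict.mk txn).getD k 0 < 0 then false
    else pvALoop txn state rest

def is_valid_transaction (txn : List (String × Int)) (state : List (String × Int)) : Bool :=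
  if txn.foldl (fun acc p => acc + p.2) 0 ≠ 0 then false
  else pvALoop txn state (txn.map Prod.fst)

-- ===== PORT B =====
def is_valid_transaction_alt (txn : List (String × Int)) (state : List (String × Int)) : Bool :=
  -- new_state = dict(state); for key, value in txn.items(): new_state[key] = new_state.get(key, 0) + value
  let new_state :=
    txn.foldl (fun d p => d.insert p.1 (d.getD p.1 0 + p.2)) (PySem.Dict.mk state)
  if new_state.values.sum ≠ (PySem.Dict.mk state).values.sum then false
  -- new_state[key] is exact as getD: every txn key was inserted into new_state by the loop.
  else (txn.map Prod.fst).all (fun k => decide (0 ≤ new_state.getD k 0))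

-- ===== PRECONDITION & SPEC =====
-- Pre_ excludes association lists with duplicate keys in either argument: such a list does
-- not represent a Python dict (both parameters are dicts in A), so any behaviour on it is
-- an accident of the list reading and neither value is specified.
def Pre_is_valid_transaction (txn : List (String × Int)) (state : List (String × Int)) : Prop :=
  (txn.map Prod.fst).Nodup ∧ (state.map Prod.fst).Nodup
instance (txn : List (String × Int)) (state : List (String × Int)) : Decidable (Pre_is_valid_transaction txn state) := by unfold Pre_is_valid_transaction; infer_instance

def pvWitness_is_valid_transaction : (List (String × Int)) × (List (String × Int)) :=
  ([("a", 2), ("b", -2)], [("b", 3)])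

def Spec_is_valid_transaction (txn : List (String × Int)) (state : List (String × Int)) (out : Bool) : Prop := out = is_valid_transaction_alt txn state
instance (txn : List (String × Int)) (state : List (String × Int)) (out : Bool) : Decidable (Spec_is_valid_transaction txn state out) := by unfold Spec_is_valid_transaction; infer_instance

-- ===== CLAIM (what is proved, stated in full; the proofs are below) =====
def Claim_equal_is_valid_transaction : Prop := ∀ (txn : List (String × Int)) (state : List (String × Int)), Dom_is_valid_transaction txn state → Pre_is_valid_transaction txn state → Spec_is_valid_transaction txn state (is_valid_transaction txn state)

-- ===== LEMMAS AND PROOFS =====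

-- Replacing the unique entry with key k by (k, v) changes the sum of second components
-- by v - w, where (k, w) is that entry.
theorem pv_sum_snd_replace (l : List (String × Int)) (k : String) (v w : Int)
    (hnd : (l.map Prod.fst).Nodup) (hm : (k, w) ∈ l) :
    ((l.map (fun p => if (p.1 == k) = true then (k, v) else p)).map Prod.snd).sum
      = (l.map Prod.snd).sum + v - w := by
  induction l with
  | nil => cases hm
  | cons q rest ih =>
    rw [List.map_cons] at hnd
    obtain ⟨h1, h2⟩ := List.nodup_cons.mp hnd
    rcases List.mem_cons.mp hm with hq | hrest
    · subst hq
      have hid : rest.map (fun p => if (p.1 == k) = true then (k, v) else p) = rest := by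
        conv_rhs => rw [← List.map_id rest]
        apply List.map_congr_left
        intro p hp
        have hne : p.1 ≠ k := fun h => h1 (List.mem_map.mpr ⟨p, hp, h⟩)
        simp [hne]
      simp only [List.map_cons, List.sum_cons, hid]
      simp
      ring
    · have hne : q.1 ≠ k := by
        intro h
        exact h1 (h ▸ List.mem_map.mpr ⟨(k, w), hrest, rfl⟩)
      simp only [List.map_cons, List.sum_cons]
      rw [if_neg (by simpa using hne), ih h2 hrest]
      ring

-- One pass of B's loop body adds exactly v to the sum of the dict's values.
theorem pv_step_sum (d : PySem.Dict String Int) (k : String) (v : Int)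
    (hnd : d.keys.Nodup) :
    (d.insert k (d.getD k 0 + v)).values.sum = d.values.sum + v := by
  have hv : d.values = d.items.map Prod.snd := rfl
  by_cases hc : d.contains k = true
  · have hk : k ∈ d.items.map Prod.fst := (PySem.Dict.contains_iff_mem_keys d k).mp hc
    obtain ⟨p, hp, hpk⟩ := List.mem_map.mp hk
    have hw : (k, p.2) ∈ d.items := by
      have h' : (p.1, p.2) ∈ d.items := by simpa using hp
      rwa [hpk] at h'
    have hget : d.getD k 0 = p.2 := PySem.Dict.getD_of_mem_items d hw hnd 0
    have hitems := PySem.Dict.items_insert_of_contains d (d.getD k 0 + v) hc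
    show ((d.insert k (d.getD k 0 + v)).items.map Prod.snd).sum = _
    rw [hitems, pv_sum_snd_replace d.items k _ p.2 hnd hw, hget, hv]
    ring
  · have hget : d.getD k 0 = 0 :=
      PySem.Dict.getD_of_not_contains d 0 (by simpa using hc)
    have hitems := PySem.Dict.items_insert_of_not_contains d (d.getD k 0 + v) (by simpa using hc)
    show ((d.insert k (d.getD k 0 + v)).items.map Prod.snd).sum = _
    rw [hitems, hget, hv]
    simp

-- B's whole loop adds the transaction total to the sum of the values.
theorem pv_fold_sum (txn : List (String × Int)) (d : PySem.Dict String Int)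
    (hnd : d.keys.Nodup) :
    (txn.foldl (fun d p => d.insert p.1 (d.getD p.1 0 + p.2)) d).values.sum
      = d.values.sum + (txn.map Prod.snd).sum := by
  induction txn generalizing d with
  | nil => simp
  | cons p rest ih =>
    simp only [List.foldl_cons, List.map_cons, List.sum_cons]
    rw [ih _ (PySem.Dict.nodup_keys_insert d p.1 _ hnd), pv_step_sum d p.1 p.2 hnd]
    ring

-- Keys not occurring in txn keep their value through B's loop.
theorem pv_fold_getD_notmem (txn : List (String × Int)) (d : PySem.Dict String Int)
    (k : String) (hk : k ∉ txn.map Prod.fst) :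
    (txn.foldl (fun d p => d.insert p.1 (d.getD p.1 0 + p.2)) d).getD k 0 = d.getD k 0 := by
  induction txn generalizing d with
  | nil => rfl
  | cons p rest ih =>
    simp only [List.map_cons, List.mem_cons, not_or] at hk
    simp only [List.foldl_cons]
    rw [ih _ hk.2, PySem.Dict.getD_insert]
    simp [hk.1]

-- A key of txn ends the loop with its old value plus its txn value (txn keys nodup).
theorem pv_fold_getD_mem (txn : List (String × Int)) (d : PySem.Dict String Int)
    (k : String) (v : Int) (hnd : (txn.map Prod.fst).Nodup) (hm : (k, v) ∈ txn) :
    (txn.foldl (fun d p => d.insert p.1 (d.getD p.1 0 + p.2)) d).getD k 0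
      = d.getD k 0 + v := by
  induction txn generalizing d with
  | nil => cases hm
  | cons p rest ih =>
    rw [List.map_cons] at hnd
    obtain ⟨h1, h2⟩ := List.nodup_cons.mp hnd
    simp only [List.foldl_cons]
    rcases List.mem_cons.mp hm with hq | hrest
    · have hk1 : k = p.1 := by rw [← hq]
      have hv1 : (d.insert p.1 (d.getD p.1 0 + p.2)).getD k 0 = d.getD k 0 + v := by
        rw [PySem.Dict.getD_insert, if_pos hk1, hk1, ← hq]
      rw [pv_fold_getD_notmem rest _ k (hk1 ▸ h1), hv1]
    · have hkrest : k ∈ rest.map Prod.fst := List.mem_map.mpr ⟨(k, v), hrest, rfl⟩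
      have hne : k ≠ p.1 := fun h => h1 (h ▸ hkrest)
      rw [ih _ h2 hrest, PySem.Dict.getD_insert]
      simp [hne]

theorem pvALoop_eq (txn state : List (String × Int)) (keys : List String) :
    pvALoop txn state keys =
      keys.all (fun k => !((PySem.Dict.mk state).getD k 0 + (PySem.Dict.mk txn).getD k 0 < 0)) := by
  induction keys with
  | nil => rfl
  | cons k rest ih =>
    simp only [pvALoop, List.all_cons]
    split_ifs with h <;> simp [h, ih]

theorem pv_getD_of_mem (txn : List (String × Int)) (p : String × Int)
    (hnd : (txn.map Prod.fst).Nodup) (hp : p ∈ txn) :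
    (PySem.Dict.mk txn).getD p.1 0 = p.2 := by
  apply PySem.Dict.getD_of_mem_items (v := p.2)
  · simpa [PySem.Dict.items] using hp
  · simpa [PySem.Dict.keys, PySem.Dict.items] using hnd

theorem is_valid_transaction_spec : Claim_equal_is_valid_transaction := by
  intro txn state _ hpre
  obtain ⟨hndt, hnds⟩ := hpre
  unfold Spec_is_valid_transaction is_valid_transaction is_valid_transaction_alt
  have hndsk : (PySem.Dict.mk state).keys.Nodup := by
    simpa [PySem.Dict.keys_mk] using hnds
  show (if txn.foldl (fun acc p => acc + p.2) 0 ≠ 0 then false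
      else pvALoop txn state (txn.map Prod.fst))
    = (if (txn.foldl (fun d p => d.insert p.1 (d.getD p.1 0 + p.2))
            (PySem.Dict.mk state)).values.sum ≠ (PySem.Dict.mk state).values.sum then false
      else (txn.map Prod.fst).all (fun k =>
        decide (0 ≤ (txn.foldl (fun d p => d.insert p.1 (d.getD p.1 0 + p.2))
            (PySem.Dict.mk state)).getD k 0)))
  rw [pvALoop_eq, PySem.List.foldl_add, pv_fold_sum txn (PySem.Dict.mk state) hndsk]
  have hall :
      (txn.map Prod.fst).all
          (fun k => !((PySem.Dict.mk state).getD k 0 + (PySem.Dict.mk txn).getD k 0 < 0))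
        = (txn.map Prod.fst).all
          (fun k => decide (0 ≤ (txn.foldl (fun d p => d.insert p.1 (d.getD p.1 0 + p.2))
              (PySem.Dict.mk state)).getD k 0)) := by
    have hpt : ∀ k ∈ txn.map Prod.fst,
        (!((PySem.Dict.mk state).getD k 0 + (PySem.Dict.mk txn).getD k 0 < 0))
          = decide (0 ≤ (txn.foldl (fun d p => d.insert p.1 (d.getD p.1 0 + p.2))
              (PySem.Dict.mk state)).getD k 0) := by
      intro k hk
      rcases List.mem_map.mp hk with ⟨p, hp, hpk⟩
      subst hpk
      rw [pv_getD_of_mem txn p hndt hp,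
        pv_fold_getD_mem txn (PySem.Dict.mk state) p.1 p.2 hndt hp,
        ← decide_not, decide_eq_decide]
      exact not_lt
    apply Bool.eq_iff_iff.mpr
    simp only [List.all_eq_true]
    exact ⟨fun h k hk => (hpt k hk) ▸ h k hk, fun h k hk => (hpt k hk).symm ▸ h k hk⟩
  split_ifs with h1 h2 h2
  · rfl
  · exact absurd (by omega : ¬ _) h2
  · exact absurd (by omega : ¬ _) h1
  · exact hall
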